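-- pv_equiv track=rewrite | github.com/infantesromeroadrian/Microsoft_Graph_App | src/services/graph_service.py | extract_user_and_message_id
-- ===== SOURCE A (Python) =====
-- def extract_user_and_message_id(
--     resource: str,
-- ) -> tuple[str | None, str | None]:
--     """
--     Extract user ID and message ID from resource path
--
--     Args:
--         resource: Resource path like 'Users/{user-id}/Messages/{message-id}'
--
--     Returns:
--         Tuple of (user_id, message_id)
--     """
--     parts = resource.split("/")
--     user_id = None
--     message_id = None
--
--     for i, part in enumerate(parts):
--         if part.lower() == "users" and i + 1 < len(parts):
--             user_id = parts[i + 1]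
--         elif part.lower() == "messages" and i + 1 < len(parts):
--             message_id = parts[i + 1]
--
--     return user_id, message_id
-- ===== SOURCE B (Python) =====
-- def extract_user_and_message_id(
--     resource: str,
-- ) -> tuple[str | None, str | None]:
--     """Extract user ID and message ID from resource path.
--
--     Staged backward search: instead of one forward pass that keeps overwriting
--     two accumulators ("last occurrence wins"), lowercase the candidate keys
--     once and, for each key, scan from the END and stop at the first match --
--     the first match from the back IS the last occurrence, so no accumulator
--     and no overwriting are needed.
--     """
--     parts = resource.split("/")
--     keys = [p.lower() for p in parts[:-1]]
--
--     def last_value_after(key):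
--         for j in range(len(keys) - 1, -1, -1):
--             if keys[j] == key:
--                 return parts[j + 1]
--         return None
--
--     return last_value_after("users"), last_value_after("messages")
-- ===== Notes on version B (the rewrite author's own statement) =====
-- stated objective: alternative
-- what changed: Replaces A's forward pass with two overwritten accumulators by a staged design: lowercase the keys once, then for each key run a backward search with early exit (first match from the back = last occurrence), so no accumulator state exists.
import Mathlib
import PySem

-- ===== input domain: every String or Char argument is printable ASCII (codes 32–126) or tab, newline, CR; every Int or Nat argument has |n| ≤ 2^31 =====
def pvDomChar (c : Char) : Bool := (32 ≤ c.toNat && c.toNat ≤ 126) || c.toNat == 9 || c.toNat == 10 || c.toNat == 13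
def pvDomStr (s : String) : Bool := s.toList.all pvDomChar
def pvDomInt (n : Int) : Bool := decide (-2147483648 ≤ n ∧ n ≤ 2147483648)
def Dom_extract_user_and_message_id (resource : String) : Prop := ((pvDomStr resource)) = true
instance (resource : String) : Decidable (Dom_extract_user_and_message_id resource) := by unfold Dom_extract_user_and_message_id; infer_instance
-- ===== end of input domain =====

-- B replaces A's forward pass with two overwritten accumulators by a staged backward
-- search with early exit per key (first match from the back = last occurrence); same O(n) cost.

-- ===== PORT A =====
-- Literal port of A's loop: enumerate over parts, two Option accumulators, bounds-guarded
-- assignment 'user_id = parts[i+1]' (inside the guard pyGet? is `some`, so storing the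
-- Option value is exactly the Python assignment into the Optional variable).
-- resource.split("/") has a nonempty literal separator, so split? is always `some`; .getD [] is exact.
def extract_user_and_message_id (resource : String) : Option String × Option String :=
  let parts := (PySem.Str.split? resource "/").getD []
  let r := (PySem.List.enumerate parts 0).foldl
    (fun (s : Option String × Option String) ip =>
      if PySem.Str.lower ip.2 == "users" && decide (ip.1 + 1 < (parts.length : Int)) then
        (PySem.List.pyGet? parts (ip.1 + 1), s.2)
      else if PySem.Str.lower ip.2 == "messages" && decide (ip.1 + 1 < (parts.length : Int)) then
        (s.1, PySem.List.pyGet? parts (ip.1 + 1))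
      else s)
    (none, none)
  r

-- ===== PORT B =====
-- B's helper last_value_after: 'for j in range(len(keys)-1, -1, -1)' counts j down; ported as
-- structural recursion on the number of indices left (argument j+1 means current index j).
-- 'return parts[j+1]' returns a str; here the in-range pyGet? is that value as `some` in the
-- Optional return type, and keys[j] (always in range) is read with pyGet?.
def pvLastValueAfter (parts keys : List String) (key : String) : Nat → Option String
  | 0 => none
  | j + 1 =>
      if PySem.List.pyGet? keys (j : Int) == some key then PySem.List.pyGet? parts ((j : Int) + 1)
      else pvLastValueAfter parts keys key j

-- Literal port of B: parts, keys = lowercased parts[:-1], then two backward searches.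
def extract_user_and_message_id_alt (resource : String) : Option String × Option String :=
  let parts := (PySem.Str.split? resource "/").getD []
  let keys := (PySem.List.slice parts none (some (-1))).map PySem.Str.lower
  (pvLastValueAfter parts keys "users" keys.length,
   pvLastValueAfter parts keys "messages" keys.length)

-- ===== PRECONDITION & SPEC =====
def Spec_extract_user_and_message_id (resource : String) (out : Option String × Option String) : Prop := out = extract_user_and_message_id_alt resource
instance (resource : String) (out : Option String × Option String) : Decidable (Spec_extract_user_and_message_id resource out) := by unfold Spec_extract_user_and_message_id; infer_instance

-- ===== CLAIM (what is proved, stated in full; the proofs are below) =====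
def Claim_equal_extract_user_and_message_id : Prop := ∀ (resource : String), Dom_extract_user_and_message_id resource → Spec_extract_user_and_message_id resource (extract_user_and_message_id resource)

-- ===== LEMMAS AND PROOFS =====

-- A's loop body over the enumerated parts
def pvBodyA (parts : List String) (s : Option String × Option String) (ip : Int × String) :
    Option String × Option String :=
  if PySem.Str.lower ip.2 == "users" && decide (ip.1 + 1 < (parts.length : Int)) then
    (PySem.List.pyGet? parts (ip.1 + 1), s.2)
  else if PySem.Str.lower ip.2 == "messages" && decide (ip.1 + 1 < (parts.length : Int)) then
    (s.1, PySem.List.pyGet? parts (ip.1 + 1))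
  else s

-- the same loop, phrased over adjacent pairs instead of indices
def pvBodyP (s : Option String × Option String) (pq : String × String) :
    Option String × Option String :=
  if PySem.Str.lower pq.1 == "users" then (some pq.2, s.2)
  else if PySem.Str.lower pq.1 == "messages" then (s.1, some pq.2)
  else s

-- single-key "last match wins" fold over the adjacent pairs
def pvLastVal (k : String) (pairs : List (String × String)) (a : Option String) : Option String :=
  pairs.foldl (fun acc pq => if PySem.Str.lower pq.1 = k then some pq.2 else acc) a

theorem pvLastVal_cons (k : String) (pq : String × String) (rest : List (String × String))
    (a : Option String) :
    pvLastVal k (pq :: rest) a = pvLastVal k rest (if PySem.Str.lower pq.1 = k then some pq.2 else a) := rfl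

-- A side: the enumerate loop over a suffix of parts equals the pair fold over that suffix
theorem pvEnumFold (parts : List String) (rest : List String) (i : Nat)
    (h : parts.drop i = rest) (s : Option String × Option String) :
    (PySem.List.enumerate rest (i : Int)).foldl (pvBodyA parts) s
      = (rest.zip rest.tail).foldl pvBodyP s := by
  induction rest generalizing i s with
  | nil => rfl
  | cons x xs ih =>
      cases xs with
      | nil =>
          have hlen : parts.length = i + 1 := by
            have h1 := congrArg List.length h
            simp at h1; omega
          have hdecf : decide ((i : Int) + 1 < (parts.length : Int)) = false := by
            rw [hlen]; simp
          simp [PySem.List.enumerate_cons, PySem.List.enumerate_nil, pvBodyA, hdecf]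
      | cons y ys =>
          have hnext : parts.drop (i + 1) = y :: ys := by rw [← List.tail_drop, h]; rfl
          have hlen : i + 1 < parts.length := by
            have h1 := congrArg List.length hnext
            simp at h1; omega
          have hidx : parts[i + 1]? = some y := by
            rw [show i + 1 = i + 1 + 0 from rfl, ← List.getElem?_drop, hnext]; rfl
          have hget : PySem.List.pyGet? parts ((i : Int) + 1) = some y := by
            rw [show (i : Int) + 1 = ((i + 1 : Nat) : Int) by push_cast; ring,
              PySem.List.pyGet?_natCast, hidx]
          have hdec : decide ((i : Int) + 1 < (parts.length : Int)) = true := by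
            simp; exact_mod_cast hlen
          have step : (PySem.List.enumerate (x :: y :: ys) (i : Int)).foldl (pvBodyA parts) s
              = (PySem.List.enumerate (y :: ys) ((i + 1 : Nat) : Int)).foldl (pvBodyA parts)
                  (pvBodyA parts s ((i : Int), x)) := by
            rw [PySem.List.enumerate_cons, List.foldl_cons]; norm_cast
          rw [step, ih (i + 1) hnext]
          simp only [List.zip_cons_cons, List.tail_cons, List.foldl_cons]
          have hinit : pvBodyA parts s ((i : Int), x) = pvBodyP s (x, y) := by
            unfold pvBodyA pvBodyP
            simp only [hdec, hget, Bool.and_true]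
          rw [hinit]

-- the pair fold splits componentwise into the two single-key folds
theorem pvPairSplit (pairs : List (String × String)) (s : Option String × Option String) :
    pairs.foldl pvBodyP s = (pvLastVal "users" pairs s.1, pvLastVal "messages" pairs s.2) := by
  induction pairs generalizing s with
  | nil => simp [pvLastVal]
  | cons pq rest ih =>
      rw [List.foldl_cons, ih, pvLastVal_cons, pvLastVal_cons]
      by_cases h1 : PySem.Str.lower pq.1 = "users"
      · have h2 : ¬ PySem.Str.lower pq.1 = "messages" := by rw [h1]; decide
        simp [pvBodyP, h1]
      · by_cases h2 : PySem.Str.lower pq.1 = "messages"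
        · simp [pvBodyP, h2]
        · simp [pvBodyP, h1, h2]

-- B side: the backward search over the first j indices equals the last-wins fold over
-- the first j adjacent pairs
theorem pvFindRevEq (parts : List String) (k : String) (j : Nat)
    (hj : j ≤ (parts.zip parts.tail).length) :
    pvLastValueAfter parts (parts.dropLast.map PySem.Str.lower) k j
      = pvLastVal k ((parts.zip parts.tail).take j) none := by
  induction j with
  | zero => rfl
  | succ j ih =>
      have hjlen : j < (parts.zip parts.tail).length := by omega
      have hlen : (parts.zip parts.tail).length = parts.length - 1 := by
        simp [List.length_zip]
      have hjp : j < parts.length - 1 := by omega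
      have hj1 : j + 1 < parts.length := by omega
      have hpair : (parts.zip parts.tail)[j] = (parts[j]'(by omega), parts[j + 1]'hj1) := by
        have := List.getElem_zip (l := parts) (l' := parts.tail) (i := j) (h := hjlen)
        rw [this]
        congr 1
        rw [List.getElem_tail]
      have htake : (parts.zip parts.tail).take (j + 1)
          = (parts.zip parts.tail).take j ++ [(parts[j]'(by omega), parts[j + 1]'hj1)] := by
        rw [← hpair]; exact List.take_succ_eq_append_getElem hjlen
      have hkeys : PySem.List.pyGet? (parts.dropLast.map PySem.Str.lower) (j : Int)
          = some (PySem.Str.lower (parts[j]'(by omega))) := by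
        rw [show ((j : Nat) : Int) = ((j : Nat) : Int) from rfl, PySem.List.pyGet?_natCast]
        rw [List.getElem?_map]
        have : parts.dropLast[j]? = some (parts[j]'(by omega)) := by
          rw [List.getElem?_eq_getElem (by simp [List.length_dropLast]; omega)]
          simp [List.getElem_dropLast]
        rw [this]; rfl
      have hparts : PySem.List.pyGet? parts ((j : Int) + 1) = some (parts[j + 1]'hj1) := by
        rw [show ((j : Nat) : Int) + 1 = ((j + 1 : Nat) : Int) by push_cast; ring,
          PySem.List.pyGet?_natCast, List.getElem?_eq_getElem hj1]
      rw [htake]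
      unfold pvLastVal
      rw [List.foldl_append]
      show pvLastValueAfter parts (parts.dropLast.map PySem.Str.lower) k (j + 1)
        = List.foldl _ (pvLastVal k ((parts.zip parts.tail).take j) none) _
      unfold pvLastValueAfter
      rw [hkeys, hparts, ih (by omega)]
      simp only [List.foldl_cons, List.foldl_nil]
      by_cases hk : PySem.Str.lower (parts[j]'(by omega)) = k
      · simp [hk]
      · simp [hk]

-- everything together, for an arbitrary parts list
theorem pvMain (parts : List String) :
    (PySem.List.enumerate parts (0 : Int)).foldl (pvBodyA parts) (none, none)
      = (pvLastValueAfter parts ((PySem.List.slice parts none (some (-1))).map PySem.Str.lower)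
           "users" ((PySem.List.slice parts none (some (-1))).map PySem.Str.lower).length,
         pvLastValueAfter parts ((PySem.List.slice parts none (some (-1))).map PySem.Str.lower)
           "messages" ((PySem.List.slice parts none (some (-1))).map PySem.Str.lower).length) := by
  have hs : PySem.List.slice parts none (some (-1)) = parts.dropLast :=
    PySem.List.slice_to_neg_one parts
  have hklen : (parts.dropLast.map PySem.Str.lower).length = (parts.zip parts.tail).length := by
    simp [List.length_zip, List.length_dropLast]
  have henum := pvEnumFold parts parts 0 (by simp) (none, none)
  rw [Nat.cast_zero] at henum
  rw [henum, pvPairSplit, hs, hklen,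
    pvFindRevEq parts "users" _ (le_refl _), pvFindRevEq parts "messages" _ (le_refl _),
    List.take_length]

-- ===== VERDICT (by name: the statement is the Claim_ definition above) =====
theorem extract_user_and_message_id_spec : Claim_equal_extract_user_and_message_id := by
  intro resource _
  unfold Spec_extract_user_and_message_id extract_user_and_message_id extract_user_and_message_id_alt
  exact pvMain ((PySem.Str.split? resource "/").getD [])
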